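-- pv_equiv track=rewrite | github.com/xiexikang/video-link-pipeline | src/video_link_pipeline/subtitles/convert.py | srt_to_vtt
-- ===== SOURCE A (Python) =====
-- def srt_to_vtt(srt_content: str) -> str:
--     """Convert SRT text into VTT text."""
--     lines = srt_content.strip().split("\n")
--     vtt_lines = ["WEBVTT", ""]
--
--     index = 0
--     while index < len(lines):
--         line = lines[index].strip()
--         if line.isdigit():
--             index += 1
--             continue
--
--         if " --> " not in line:
--             index += 1
--             continue
--
--         time_parts = line.replace(",", ".").split(" --> ")
--         start_time = time_parts[0].strip()
--         end_time = time_parts[1].strip()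
--         vtt_lines.append(f"{start_time} --> {end_time}")
--
--         index += 1
--         while index < len(lines) and lines[index].strip() != "":
--             vtt_lines.append(lines[index].strip())
--             index += 1
--
--         vtt_lines.append("")
--
--     return "\n".join(vtt_lines)
-- ===== SOURCE B (Python) =====
-- def srt_to_vtt(srt_content: str) -> str:
--     """Convert SRT text into VTT text."""
--     lines = [raw.strip() for raw in srt_content.strip().split("\n")]
--
--     # group the stripped lines into blocks separated by empty lines
--     blocks = []
--     current = []
--     for line in lines:
--         if line == "":
--             if current:
--                 blocks.append(current)
--                 current = []
--         else:
--             current.append(line)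
--     if current:
--         blocks.append(current)
--
--     out = ["WEBVTT", ""]
--     for block in blocks:
--         # drop leading lines without a timestamp (indices, stray text)
--         i = 0
--         while i < len(block) and " --> " not in block[i]:
--             i += 1
--         if i == len(block):
--             continue
--         parts = block[i].replace(",", ".").split(" --> ")
--         out.append(f"{parts[0].strip()} --> {parts[1].strip()}")
--         out.extend(block[i + 1:])
--         out.append("")
--     return "\n".join(out)
-- ===== Notes on version B (the rewrite author's own statement) =====
-- stated objective: alternative
-- what changed: Instead of A's single index-driven while loop with a nested cue-text loop, B strips every line once, folds the lines into blocks separated by blank lines, and then emits one cue per block (skipping leading lines without ' --> ').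
import Mathlib
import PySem

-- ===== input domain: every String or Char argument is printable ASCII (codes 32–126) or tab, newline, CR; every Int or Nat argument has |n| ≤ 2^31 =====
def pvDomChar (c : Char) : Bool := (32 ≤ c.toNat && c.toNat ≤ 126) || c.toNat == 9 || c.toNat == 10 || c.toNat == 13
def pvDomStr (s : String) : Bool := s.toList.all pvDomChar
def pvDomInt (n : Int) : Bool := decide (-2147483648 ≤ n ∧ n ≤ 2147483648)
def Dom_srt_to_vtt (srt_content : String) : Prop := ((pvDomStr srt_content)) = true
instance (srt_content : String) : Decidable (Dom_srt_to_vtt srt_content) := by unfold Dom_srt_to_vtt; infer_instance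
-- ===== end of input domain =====

-- B regroups the work: it strips all lines once, folds them into blocks separated by blank
-- lines, and emits one cue per block (same output as A; objective: alternative decomposition).


-- ===== PORT A =====
-- A's outer while loop over `index`, as structural recursion on the remaining lines; the
-- inner cue-text while loop is the takeWhile/dropWhile split at the first blank line.
def pvALoop (ls : List String) : List String :=
  match ls with
  | [] => []
  | l :: rest =>
    let line := PySem.Str.strip l
    if PySem.Str.strIsdigit line then pvALoop rest
    else if PySem.Str.isIn " --> " line = false then pvALoop rest
    else
      -- " --> " is present, so the split has ≥ 2 parts and Python's [0]/[1] never raise;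
      -- the getD defaults are never used (split? is some: the separator is non-empty)
      let timeParts := (PySem.Str.split? (PySem.Str.replace line "," ".") " --> ").getD []
      let startTime := PySem.Str.strip (PySem.List.pyGetD timeParts 0 "")
      let endTime := PySem.Str.strip (PySem.List.pyGetD timeParts 1 "")
      (startTime ++ " --> " ++ endTime) ::
        ((rest.takeWhile (fun x => decide (PySem.Str.strip x ≠ ""))).map PySem.Str.strip ++ [""]
          ++ pvALoop (rest.dropWhile (fun x => decide (PySem.Str.strip x ≠ ""))))
termination_by ls.length
decreasing_by
  · simp
  · simp
  · exact Nat.lt_succ_of_le (List.length_dropWhile_le _ _)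

def srt_to_vtt (srt_content : String) : String :=
  -- sep "\n" is non-empty, so split? is always `some` — the getD default is never used
  let lines := (PySem.Str.split? (PySem.Str.strip srt_content) "\n").getD []
  PySem.Str.join "\n" (["WEBVTT", ""] ++ pvALoop lines)

-- ===== PORT B =====
-- fold body of B's block-building loop; the accumulator is (blocks so far, current block)
def pvBlockStep (acc : List (List String) × List String) (line : String) :
    List (List String) × List String :=
  if line = "" then (if acc.2 = [] then acc else (acc.1 ++ [acc.2], []))
  else (acc.1, acc.2 ++ [line])

def pvBlocks (lines : List String) : List (List String) :=
  let p := lines.foldl pvBlockStep ([], [])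
  if p.2 = [] then p.1 else p.1 ++ [p.2]

-- B's per-block emission: skip to the first line containing " --> " (the while loop on i),
-- then the cue line, the rest of the block, and a trailing "".
def pvEmit (block : List String) : List String :=
  match block.dropWhile (fun l => PySem.Str.isIn " --> " l = false) with
  | [] => []
  | t :: tl =>
    let parts := (PySem.Str.split? (PySem.Str.replace t "," ".") " --> ").getD []
    (PySem.Str.strip (PySem.List.pyGetD parts 0 "") ++ " --> "
      ++ PySem.Str.strip (PySem.List.pyGetD parts 1 "")) :: (tl ++ [""])

def srt_to_vtt_alt (srt_content : String) : String :=
  let lines := ((PySem.Str.split? (PySem.Str.strip srt_content) "\n").getD []).map PySem.Str.strip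
  PySem.Str.join "\n" (["WEBVTT", ""] ++ (pvBlocks lines).flatMap pvEmit)

-- ===== PRECONDITION & SPEC =====
def Spec_srt_to_vtt (srt_content : String) (out : String) : Prop := out = srt_to_vtt_alt srt_content
instance (srt_content : String) (out : String) : Decidable (Spec_srt_to_vtt srt_content out) := by unfold Spec_srt_to_vtt; infer_instance

-- ===== CLAIM (what is proved, stated in full; the proofs are below) =====
def Claim_equal_srt_to_vtt : Prop := ∀ (srt_content : String), Dom_srt_to_vtt srt_content → Spec_srt_to_vtt srt_content (srt_to_vtt srt_content)

-- ===== LEMMAS AND PROOFS =====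

-- the maximal runs of non-empty lines: a recursive characterisation of pvBlocks
def pvRuns (ls : List String) : List (List String) :=
  match ls with
  | [] => []
  | x :: xs =>
    if x = "" then pvRuns xs
    else (x :: xs.takeWhile (fun y => decide (y ≠ ""))) ::
           pvRuns (xs.dropWhile (fun y => decide (y ≠ "")))
termination_by ls.length
decreasing_by
  · simp
  · exact Nat.lt_succ_of_le (List.length_dropWhile_le _ _)

lemma pvFoldl_blockStep (xs : List String) (bs : List (List String)) (cur : List String) :
    (let p := xs.foldl pvBlockStep (bs, cur); if p.2 = [] then p.1 else p.1 ++ [p.2]) =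
      bs ++ (if cur = [] then pvRuns xs
             else (cur ++ xs.takeWhile (fun y => decide (y ≠ ""))) ::
                    pvRuns (xs.dropWhile (fun y => decide (y ≠ "")))) := by
  induction xs generalizing bs cur with
  | nil => by_cases h : cur = [] <;> simp [h, pvRuns]
  | cons x xs ih =>
    by_cases hx : x = ""
    · by_cases hc : cur = []
      · simp [hx, hc, pvBlockStep, List.foldl_cons, ih, pvRuns]
      · simp only [List.foldl_cons, pvBlockStep, hx, hc]
        rw [ih]
        simp [pvRuns, List.append_assoc]
    · by_cases hc : cur = []
      · simp only [List.foldl_cons, pvBlockStep, if_neg hx]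
        rw [ih]
        simp [hx, hc, pvRuns]
      · simp only [List.foldl_cons, pvBlockStep, if_neg hx]
        rw [ih]
        have : cur ++ [x] ≠ [] := by simp
        simp [this, hc, hx, List.append_assoc]

lemma pvBlocks_eq_runs (ls : List String) : pvBlocks ls = pvRuns ls := by
  have := pvFoldl_blockStep ls [] []
  simpa [pvBlocks] using this

lemma pvArrow_ne_empty {s : String} (h : PySem.Str.isIn " --> " s = true) : s ≠ "" := by
  intro he; subst he; simp [PySem.Str.isIn_eq] at h
  rw [PySem.Chars.isIn_iff_infix] at h
  simp at h

lemma pvDigit_no_arrow {s : String} (h : PySem.Str.strIsdigit s = true) :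
    PySem.Str.isIn " --> " s = false := by
  rw [PySem.Str.strIsdigit_eq, PySem.Chars.strIsdigit] at h
  simp at h
  by_contra hc
  simp only [Bool.not_eq_false, PySem.Str.isIn_eq, PySem.Chars.isIn_iff_infix] at hc
  have hsp : ' ' ∈ s.toList := hc.mem (by simp)
  have := h.2 ' ' hsp
  simp [PySem.Chars.isdigit] at this

lemma pvEmit_cons_noarrow {x : String} (xs : List String)
    (ha : PySem.Str.isIn " --> " x = false) : pvEmit (x :: xs) = pvEmit xs := by
  rw [pvEmit, pvEmit, List.dropWhile_cons_of_pos (by simp only [decide_eq_true_eq]; exact ha)]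

lemma pvRuns_flat_cons_noarrow (x : String) (xs : List String) (hx : x ≠ "")
    (ha : PySem.Str.isIn " --> " x = false) :
    (pvRuns (x :: xs)).flatMap pvEmit = (pvRuns xs).flatMap pvEmit := by
  rw [pvRuns, if_neg hx]
  cases xs with
  | nil =>
    rw [List.takeWhile_nil, List.dropWhile_nil]
    simp only [pvRuns, List.flatMap_cons, List.flatMap_nil, List.append_nil]
    rw [pvEmit_cons_noarrow _ ha]
    rfl
  | cons y ys =>
    by_cases hy : y = ""
    · subst hy
      rw [List.takeWhile_cons_of_neg (by simp), List.dropWhile_cons_of_neg (by simp)]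
      simp only [List.flatMap_cons]
      rw [pvEmit_cons_noarrow _ ha]
      simp only [pvEmit, List.dropWhile_nil, List.nil_append]
    · rw [pvRuns, if_neg hy,
        List.takeWhile_cons_of_pos (by simp only [decide_eq_true_eq]; exact hy),
        List.dropWhile_cons_of_pos (by simp only [decide_eq_true_eq]; exact hy)]
      simp only [List.flatMap_cons]
      rw [pvEmit_cons_noarrow _ ha]

lemma pvALoop_eq (ls : List String) :
    pvALoop ls = (pvRuns (ls.map PySem.Str.strip)).flatMap pvEmit := by
  induction hn : ls.length using Nat.strong_induction_on generalizing ls with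
  | _ n ih =>
  cases ls with
  | nil => simp [pvALoop, pvRuns]
  | cons l rest =>
    subst hn
    have ihrest : ∀ ms : List String, ms.length ≤ rest.length →
        pvALoop ms = (pvRuns (ms.map PySem.Str.strip)).flatMap pvEmit := fun ms hms =>
      ih ms.length (by simpa using Nat.lt_succ_of_le hms) ms rfl
    by_cases harrow : PySem.Str.isIn " --> " (PySem.Str.strip l) = true
    · -- timestamp line
      have hx : PySem.Str.strip l ≠ "" := pvArrow_ne_empty harrow
      have hdig : PySem.Str.strIsdigit (PySem.Str.strip l) = false := by
        by_contra hd
        simp only [Bool.not_eq_false] at hd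
        rw [pvDigit_no_arrow hd] at harrow; exact Bool.false_ne_true harrow
      rw [pvALoop, if_neg (by simp only [hdig]; exact Bool.false_ne_true),
        if_neg (by simp only [harrow]; exact fun h => Bool.false_ne_true h.symm)]
      rw [List.map_cons, pvRuns, if_neg hx]
      rw [List.flatMap_cons, pvEmit,
        List.dropWhile_cons_of_neg
          (by simp only [decide_eq_true_eq, harrow]; exact fun h => Bool.false_ne_true h.symm)]
      rw [List.takeWhile_map, List.dropWhile_map]
      rw [ihrest (rest.dropWhile (fun x => decide (PySem.Str.strip x ≠ "")))
        (List.length_dropWhile_le _ _)]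
      simp [Function.comp_def]
    · -- skipped line (digit, blank or stray text): both sides drop it
      simp only [Bool.not_eq_true] at harrow
      have hskip : pvALoop (l :: rest) = pvALoop rest := by
        rw [pvALoop]
        by_cases hd : PySem.Str.strIsdigit (PySem.Str.strip l) = true
        · rw [if_pos hd]
        · rw [if_neg hd, if_pos harrow]
      rw [hskip, ihrest rest (le_refl _), List.map_cons]
      by_cases hx : PySem.Str.strip l = ""
      · rw [hx, pvRuns, if_pos rfl]
      · rw [pvRuns_flat_cons_noarrow _ _ hx harrow]

-- ===== VERDICT (by name: the statement is the Claim_ definition above) =====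
theorem srt_to_vtt_spec : Claim_equal_srt_to_vtt := by
  intro s _
  show srt_to_vtt s = srt_to_vtt_alt s
  simp only [srt_to_vtt, srt_to_vtt_alt, pvBlocks_eq_runs, pvALoop_eq]
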